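-- pv_equiv track=rewrite | github.com/JoaoCarlos1342/LECI | 1o1s/FP/Exercícios Resolvidos/progG.py | gaming_history
-- ===== SOURCE A (Python) =====
-- def gaming_history(gaming):
--     history = {}
--     for player, games in gaming.items():
--         for game, dates in games.items():
--             # max() funciona em tuplos (Ano, Mes, Dia) corretamente
--             last_date = max(dates)
--
--             if game not in history:
--                 history[game] = {}
--
--             history[game][player] = last_date
--     return history
-- ===== SOURCE B (Python) =====
-- def gaming_history(gaming):
--     # Transposed traversal: build the game index first, then one pass per game over players.
--     order = list(dict.fromkeys(g for gs in gaming.values() for g in gs))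
--     return {g: {p: max(gs[g]) for p, gs in gaming.items() if g in gs}
--             for g in order}
-- ===== Notes on version B (the rewrite author's own statement) =====
-- stated objective: alternative
-- what changed: B first builds the ordered index of all game names, then constructs the result as a game-outer dict comprehension that rescans the players per game, instead of A's single player-outer pass that grows nested dicts incrementally.
import Mathlib
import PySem

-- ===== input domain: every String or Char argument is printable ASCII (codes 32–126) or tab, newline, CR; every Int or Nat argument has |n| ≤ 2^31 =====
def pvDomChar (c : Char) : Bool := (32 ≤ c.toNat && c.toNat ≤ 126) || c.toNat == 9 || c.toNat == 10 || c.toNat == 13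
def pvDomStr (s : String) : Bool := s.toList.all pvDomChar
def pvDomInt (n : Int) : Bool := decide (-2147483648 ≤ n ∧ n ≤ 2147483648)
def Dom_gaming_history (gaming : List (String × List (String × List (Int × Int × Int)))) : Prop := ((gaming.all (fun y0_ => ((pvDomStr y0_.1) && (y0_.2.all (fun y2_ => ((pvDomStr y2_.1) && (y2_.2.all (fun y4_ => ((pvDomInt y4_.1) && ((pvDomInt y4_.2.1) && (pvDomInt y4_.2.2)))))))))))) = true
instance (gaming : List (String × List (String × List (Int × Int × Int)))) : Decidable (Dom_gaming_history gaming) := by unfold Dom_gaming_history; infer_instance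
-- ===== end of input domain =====

-- B rebuilds the same result by a transposed traversal (game-outer, players rescanned per game)
-- instead of A's incremental player-outer nested-dict pass; alternative decomposition, not faster.

-- shared helper: Python's max() on a nonempty list of (Int,Int,Int) tuples (lexicographic;
-- keeps the current element on ties, exactly like Python's max). Both Pythons call max(dates).
def pvTupLt (a b : Int × Int × Int) : Bool :=
  decide (a.1 < b.1) || (decide (a.1 = b.1) && (decide (a.2.1 < b.2.1) || (decide (a.2.1 = b.2.1) && decide (a.2.2 < b.2.2))))

def pyMaxDates (ds : List (Int × Int × Int)) : Int × Int × Int :=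
  match ds with
  | [] => (0, 0, 0)  -- Python's max raises ValueError here; such inputs are excluded by Pre_gaming_history
  | d :: rest => rest.foldl (fun m x => if pvTupLt m x then x else m) d

-- ===== PORT A =====
def gaming_history (gaming : List (String × List (String × List (Int × Int × Int)))) : List (String × List (String × Int × Int × Int)) :=
  ((PySem.Dict.ofList gaming).items.foldl
    (fun history pg =>
      (PySem.Dict.ofList pg.2).items.foldl
        (fun h gd =>
          let last := pyMaxDates gd.2
          let h' := if h.contains gd.1 then h else h.insert gd.1 PySem.Dict.empty
          h'.insert gd.1 ((h'.getD gd.1 PySem.Dict.empty).insert pg.1 last))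
        history)
    PySem.Dict.empty).items.map (fun gd => (gd.1, gd.2.items))

-- ===== PORT B =====
def gaming_history_alt (gaming : List (String × List (String × List (Int × Int × Int)))) : List (String × List (String × Int × Int × Int)) :=
  let G := PySem.Dict.ofList gaming
  let order := PySem.List.dedup (G.items.flatMap (fun pg => (PySem.Dict.ofList pg.2).keys))
  order.map (fun g =>
    (g, G.items.filterMap (fun pg =>
        ((PySem.Dict.ofList pg.2).get? g).map (fun ds => (pg.1, pyMaxDates ds)))))

-- ===== PRECONDITION & SPEC =====
-- Pre_ excludes exactly the inputs where Python A raises: after Python's dict construction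
-- collapses duplicate keys, some game has a date list with no elements, and max raises ValueError there.
def Pre_gaming_history (gaming : List (String × List (String × List (Int × Int × Int)))) : Prop :=
  ∀ pg ∈ (PySem.Dict.ofList gaming).items, ∀ gd ∈ (PySem.Dict.ofList pg.2).items, gd.2 ≠ []
instance (gaming : List (String × List (String × List (Int × Int × Int)))) : Decidable (Pre_gaming_history gaming) := by unfold Pre_gaming_history; infer_instance
def pvWitness_gaming_history : (List (String × List (String × List (Int × Int × Int)))) :=
  [("alice", [("chess", [(2020,1,1),(2021,5,3)])]), ("bob", [("chess", [(2019,2,2)]), ("go", [(2022,3,4)])])]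

def Spec_gaming_history (gaming : List (String × List (String × List (Int × Int × Int)))) (out : List (String × List (String × Int × Int × Int))) : Prop := out = gaming_history_alt gaming
instance (gaming : List (String × List (String × List (Int × Int × Int)))) (out : List (String × List (String × Int × Int × Int))) : Decidable (Spec_gaming_history gaming out) := by unfold Spec_gaming_history; infer_instance

-- ===== CLAIM (what is proved, stated in full; the proofs are below) =====
def Claim_equal_gaming_history : Prop := ∀ (gaming : List (String × List (String × List (Int × Int × Int)))), Dom_gaming_history gaming → Pre_gaming_history gaming → Spec_gaming_history gaming (gaming_history gaming)

-- ===== LEMMAS AND PROOFS =====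

-- A's inner-loop body (generic in the value type β)
def pvStepG {β : Type} (p : String) (h : PySem.Dict String (PySem.Dict String β)) (gv : String × β) : PySem.Dict String (PySem.Dict String β) :=
  h.insert gv.1 ((h.getD gv.1 PySem.Dict.empty).insert p gv.2)

def pvStepRow {β : Type} (h : PySem.Dict String (PySem.Dict String β)) (r : String × List (String × β)) : PySem.Dict String (PySem.Dict String β) :=
  r.2.foldl (pvStepG r.1) h

-- A's literal body (with the `if game not in history` guard) is pvStepG
theorem pvStepG_eq {β : Type} (h : PySem.Dict String (PySem.Dict String β)) (g p : String) (v : β) :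
    (let h' := if h.contains g then h else h.insert g PySem.Dict.empty;
     h'.insert g ((h'.getD g PySem.Dict.empty).insert p v)) = pvStepG p h (g, v) := by
  by_cases hc : h.contains g = true
  · simp [hc, pvStepG]
  · simp only [Bool.not_eq_true] at hc
    simp [hc, pvStepG, PySem.Dict.getD_insert_self, PySem.Dict.insert_insert_self,
      PySem.Dict.getD_of_not_contains h PySem.Dict.empty hc]

-- a fold over keys not containing g leaves slot g alone
theorem pvFold_untouched {β : Type} (xs : List (String × β)) (p : String)
    (h : PySem.Dict String (PySem.Dict String β)) (g : String) (hg : g ∉ xs.map (·.1)) :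
    (xs.foldl (pvStepG p) h).getD g PySem.Dict.empty = h.getD g PySem.Dict.empty := by
  induction xs generalizing h with
  | nil => rfl
  | cons gv rest ih =>
    simp only [List.map_cons, List.mem_cons, not_or] at hg
    rw [List.foldl_cons, ih _ hg.2, pvStepG,
      PySem.Dict.getD_insert_of_ne _ _ _ hg.1]

-- inner step: one row (p, xs) appends (p, v) to slot g exactly when xs maps g to v
theorem pvInner_step {β : Type} (xs : List (String × β)) (p : String)
    (h : PySem.Dict String (PySem.Dict String β)) (g : String)
    (hnd : (xs.map (·.1)).Nodup) (hp : p ∉ (h.getD g PySem.Dict.empty).keys) :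
    ((xs.foldl (pvStepG p) h).getD g PySem.Dict.empty).items
      = (h.getD g PySem.Dict.empty).items
        ++ (((PySem.Dict.mk xs).get? g).map (fun v => (p, v))).toList := by
  induction xs generalizing h with
  | nil => simp [PySem.Dict.get?]
  | cons gv rest ih =>
    obtain ⟨gk, gw⟩ := gv
    simp only [List.map_cons, List.nodup_cons] at hnd
    rw [List.foldl_cons]
    by_cases he : g = gk
    · subst he
      rw [pvFold_untouched _ _ _ _ hnd.1]
      have hcon : (h.getD g PySem.Dict.empty).contains p = false := by
        rw [← Bool.not_eq_true, PySem.Dict.contains_iff_mem_keys]; exact hp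
      simp [pvStepG, PySem.Dict.getD_insert_self, PySem.Dict.get?_mk_cons,
        PySem.Dict.items_insert_of_not_contains _ _ hcon]
    · have heq : (pvStepG p h (gk, gw)).getD g PySem.Dict.empty = h.getD g PySem.Dict.empty := by
        rw [pvStepG, PySem.Dict.getD_insert_of_ne _ _ _ he]
      rw [ih _ hnd.2 (by rw [heq]; exact hp), heq,
        PySem.Dict.get?_mk_cons]
      simp [show (gk == g) = false by simpa using fun hh => he hh.symm]

-- whole fold, pointwise at slot g
theorem pvFold_getD {β : Type} (rows : List (String × List (String × β)))
    (H : PySem.Dict String (PySem.Dict String β)) (g : String)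
    (houter : (rows.map (·.1)).Nodup)
    (hinner : ∀ r ∈ rows, (r.2.map (·.1)).Nodup)
    (hfresh : ∀ r ∈ rows, ∀ g', r.1 ∉ ((H.getD g' PySem.Dict.empty)).keys) :
    ((rows.foldl pvStepRow H).getD g PySem.Dict.empty).items
      = (H.getD g PySem.Dict.empty).items
        ++ rows.filterMap (fun r => ((PySem.Dict.mk r.2).get? g).map (fun v => (r.1, v))) := by
  induction rows generalizing H with
  | nil => simp
  | cons r rest ih =>
    simp only [List.map_cons, List.nodup_cons] at houter
    have hstep : ∀ g', ((pvStepRow H r).getD g' PySem.Dict.empty).items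
        = (H.getD g' PySem.Dict.empty).items
          ++ (((PySem.Dict.mk r.2).get? g').map (fun v => (r.1, v))).toList :=
      fun g' => pvInner_step r.2 r.1 H g' (hinner r (by simp)) (hfresh r (by simp) g')
    have hkeys : ∀ g', ((pvStepRow H r).getD g' PySem.Dict.empty).keys
        = (H.getD g' PySem.Dict.empty).keys
          ++ ((((PySem.Dict.mk r.2).get? g').map (fun v => (r.1, v))).toList.map (·.1)) := by
      intro g'; rw [PySem.Dict.keys, hstep g', List.map_append]; rfl
    have hfresh' : ∀ q ∈ rest, ∀ g', q.1 ∉ ((pvStepRow H r).getD g' PySem.Dict.empty).keys := by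
      intro q hq g'
      rw [hkeys g', List.mem_append]
      rintro (hin | hin)
      · exact hfresh q (by simp [hq]) g' hin
      · cases hv : (PySem.Dict.mk r.2).get? g' <;> rw [hv] at hin <;> simp at hin
        exact houter.1 (hin ▸ List.mem_map_of_mem hq)
    rw [List.foldl_cons, ih (pvStepRow H r) houter.2 (fun q hq => hinner q (List.mem_cons_of_mem _ hq)) hfresh',
      hstep g, List.append_assoc, List.filterMap_cons]
    cases (PySem.Dict.mk r.2).get? g
    · simp
    · simp

-- keys of the whole fold, in first-appearance order
theorem pvFold_keys {β : Type} (rows : List (String × List (String × β)))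
    (H : PySem.Dict String (PySem.Dict String β)) :
    (rows.foldl pvStepRow H).keys
      = PySem.Set.update H.keys (rows.flatMap (fun r => r.2.map (·.1))) := by
  induction rows generalizing H with
  | nil => simp [PySem.Set.update]
  | cons r rest ih =>
    rw [List.foldl_cons, ih, List.flatMap_cons, PySem.Set.update_append]
    congr 1
    exact PySem.Dict.keys_foldl_insert_key r.2 (·.1)
      (fun h gv => (h.getD gv.1 PySem.Dict.empty).insert r.1 gv.2) H

-- lookup in a value-mapped association list
theorem pvGet?_mk_mapVal {β γ : Type} (l : List (String × β)) (f : β → γ) (g : String) :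
    (PySem.Dict.mk (l.map (fun gd => (gd.1, f gd.2)))).get? g
      = ((PySem.Dict.mk l).get? g).map f := by
  induction l with
  | nil => rfl
  | cons gd rest ih =>
    obtain ⟨gk, gw⟩ := gd
    simp only [List.map_cons, PySem.Dict.get?_mk_cons]
    by_cases he : (gk == g) = true <;> simp [he, ih]

-- the transposition theorem
theorem pvTranspose {β : Type} (rows : List (String × List (String × β)))
    (houter : (rows.map (·.1)).Nodup)
    (hinner : ∀ r ∈ rows, (r.2.map (·.1)).Nodup) :
    (rows.foldl pvStepRow PySem.Dict.empty).items.map (fun gd => (gd.1, gd.2.items))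
      = (PySem.List.dedup (rows.flatMap (fun r => r.2.map (·.1)))).map
          (fun g => (g, rows.filterMap (fun r => ((PySem.Dict.mk r.2).get? g).map (fun v => (r.1, v))))) := by
  have hkeys : (rows.foldl pvStepRow PySem.Dict.empty).keys
      = PySem.List.dedup (rows.flatMap (fun r => r.2.map (·.1))) := by
    rw [pvFold_keys]
    simp [PySem.Set.update_nil_left]
  have hnd : (rows.foldl pvStepRow PySem.Dict.empty).keys.Nodup := by
    rw [hkeys, PySem.List.dedup_eq_ofList]; exact PySem.Set.nodup_ofList _
  rw [PySem.Dict.items_eq_map_keys _ hnd PySem.Dict.empty, hkeys, List.map_map]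
  refine List.map_congr_left (fun g hg => ?_)
  simp only [Function.comp]
  rw [pvFold_getD rows PySem.Dict.empty g houter hinner (by simp [PySem.Dict.getD, PySem.Dict.get?, PySem.Dict.keys, PySem.Dict.empty])]
  simp [PySem.Dict.getD, PySem.Dict.get?, PySem.Dict.empty]

-- ===== VERDICT (by name: the statement is the Claim_ definition above) =====
theorem gaming_history_spec : Claim_equal_gaming_history := by
  intro gaming _ _
  unfold Spec_gaming_history gaming_history gaming_history_alt
  have hrowmap :
      (PySem.Dict.ofList gaming).items.foldl
        (fun history pg => (PySem.Dict.ofList pg.2).items.foldl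
          (fun h gd =>
            let last := pyMaxDates gd.2
            let h' := if h.contains gd.1 then h else h.insert gd.1 PySem.Dict.empty
            h'.insert gd.1 ((h'.getD gd.1 PySem.Dict.empty).insert pg.1 last)) history)
        PySem.Dict.empty
      = ((PySem.Dict.ofList gaming).items.map
          (fun pg => (pg.1, (PySem.Dict.ofList pg.2).items.map (fun gd => (gd.1, pyMaxDates gd.2))))).foldl
          pvStepRow PySem.Dict.empty := by
    rw [List.foldl_map]
    congr 1
    funext history pg
    simp only [pvStepRow, List.foldl_map]
    congr 1
    funext h gd
    exact pvStepG_eq h gd.1 pg.1 (pyMaxDates gd.2)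
  rw [hrowmap, pvTranspose]
  · have horder :
        (((PySem.Dict.ofList gaming).items.map
            (fun pg => (pg.1, (PySem.Dict.ofList pg.2).items.map (fun gd => (gd.1, pyMaxDates gd.2))))).flatMap
          (fun r => r.2.map (·.1)))
        = (PySem.Dict.ofList gaming).items.flatMap (fun pg => (PySem.Dict.ofList pg.2).keys) := by
      simp [List.flatMap_map, Function.comp_def, List.map_map, PySem.Dict.keys]
    rw [horder]
    refine List.map_congr_left (fun g hg => ?_)
    congr 1
    rw [List.filterMap_map]
    refine List.filterMap_congr (fun pg hpg => ?_)
    rw [Function.comp, pvGet?_mk_mapVal, Option.map_map]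
    rfl
  · simp only [List.map_map]
    exact PySem.Dict.nodup_keys_ofList gaming
  · intro r hr
    simp only [List.mem_map] at hr
    obtain ⟨pg, _, rfl⟩ := hr
    simp only [List.map_map]
    exact PySem.Dict.nodup_keys_ofList pg.2
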